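-- pv_equiv track=rewrite | github.com/n30j0su3/Model-Agnostic-AI-Personal-Assistant-Framework-PreAlpha | core/skills/core/markdown-writer/scripts/toc-generator.py | insert_toc
-- ===== SOURCE A (Python) =====
-- def insert_toc(content: str, toc: str) -> str:
--     """
--     Inserta TOC después del primer H1 o frontmatter.
--
--     Args:
--         content: Contenido original
--         toc: Tabla de contenidos generada
--
--     Returns:
--         Contenido con TOC insertada
--     """
--     lines = content.split("\n")
--
--     # Buscar dónde insertar (después de H1 o después de frontmatter)
--     insert_idx = 0
--     in_frontmatter = False
--     frontmatter_end = -1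
--     h1_idx = -1
--
--     for i, line in enumerate(lines):
--         # Detectar frontmatter
--         if i == 0 and line.strip() == "---":
--             in_frontmatter = True
--             continue
--
--         if in_frontmatter:
--             if line.strip() == "---":
--                 frontmatter_end = i
--                 in_frontmatter = False
--             continue
--
--         # Detectar H1
--         if line.startswith("# ") and h1_idx == -1:
--             h1_idx = i
--             break
--
--     # Decidir dónde insertar
--     if frontmatter_end != -1:
--         insert_idx = frontmatter_end + 1
--     elif h1_idx != -1:
--         insert_idx = h1_idx + 1
--     else:
--         insert_idx = 0
--
--     # Insertar TOC
--     new_lines = lines[:insert_idx] + ["", toc] + lines[insert_idx:]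
--
--     return "\n".join(new_lines)
-- ===== SOURCE B (Python) =====
-- def insert_toc(content: str, toc: str) -> str:
--     """Insert TOC after closed frontmatter, else after the first H1, else at the top.
--
--     Indexes the document first (all fence positions, all H1 positions) and then
--     decides the insertion point by pure arithmetic on those indexes -- no flags,
--     no early exit, no per-line state machine.
--     """
--     lines = content.split("\n")
--     fences = [i for i, l in enumerate(lines) if l.strip() == "---"]
--     h1s = [i for i, l in enumerate(lines) if l.startswith("# ")]
--     if fences[:1] == [0]:
--         idx = fences[1] + 1 if len(fences) > 1 else 0
--     else:
--         idx = h1s[0] + 1 if h1s else 0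
--     return "\n".join(lines[:idx] + ["", toc] + lines[idx:])
-- ===== Notes on version B (the rewrite author's own statement) =====
-- stated objective: alternative
-- what changed: Instead of A's per-line state machine (flags in_frontmatter/frontmatter_end/h1_idx with a break), B first builds two position indexes with comprehensions (all fence-line indices, all H1-line indices) and then picks the insertion point by arithmetic on those lists: second fence if the document opens with a fence, else first H1, else 0.
import Mathlib
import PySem

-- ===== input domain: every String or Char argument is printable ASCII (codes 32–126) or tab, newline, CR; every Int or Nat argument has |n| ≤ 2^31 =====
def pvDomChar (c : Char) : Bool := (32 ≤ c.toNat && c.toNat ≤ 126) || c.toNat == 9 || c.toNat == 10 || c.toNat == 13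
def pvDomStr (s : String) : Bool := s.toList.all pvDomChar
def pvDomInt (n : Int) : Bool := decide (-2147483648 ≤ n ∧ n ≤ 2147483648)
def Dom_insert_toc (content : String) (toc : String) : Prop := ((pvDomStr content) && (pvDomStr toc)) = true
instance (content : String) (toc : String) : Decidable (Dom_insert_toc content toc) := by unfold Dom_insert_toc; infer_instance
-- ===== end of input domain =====

-- B replaces A's per-line state machine by two precomputed position indexes (fence lines, H1 lines)
-- and picks the insertion point by arithmetic on them; objective: alternative (same cost).

-- ===== PORT A =====
-- A's for-loop over enumerate(lines) with state (in_frontmatter, frontmatter_end, h1_idx);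
-- the `break` on H1 becomes an early return of the state pair.
def pvLoopA : List String → Int → Bool → Int → Int → (Int × Int)
  | [], _, _, fe, h1 => (fe, h1)
  | l :: rest, i, infm, fe, h1 =>
    if i == 0 && PySem.Str.strip l == "---" then pvLoopA rest (i + 1) true fe h1
    else if infm then
      if PySem.Str.strip l == "---" then pvLoopA rest (i + 1) false i h1
      else pvLoopA rest (i + 1) infm fe h1
    else if PySem.Str.startswith l "# " && h1 == -1 then (fe, i)  -- break
    else pvLoopA rest (i + 1) infm fe h1

def insert_toc (content : String) (toc : String) : String :=
  -- content.split("\n"): sep is the nonempty literal "\n" so split? is always some; getD [] is that value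
  let lines := (PySem.Str.split? content "\n").getD []
  let r := pvLoopA lines 0 false (-1) (-1)
  let insert_idx : Int := if r.1 ≠ -1 then r.1 + 1 else if r.2 ≠ -1 then r.2 + 1 else 0
  -- lines[:insert_idx] / lines[insert_idx:] with insert_idx ≥ 0 are exactly take/drop
  PySem.Str.join "\n" (lines.take insert_idx.toNat ++ ["", toc] ++ lines.drop insert_idx.toNat)

-- ===== PORT B =====
def insert_toc_alt (content : String) (toc : String) : String :=
  let lines := (PySem.Str.split? content "\n").getD []
  -- the two index-building comprehensions over enumerate(lines)
  let fences := ((PySem.List.enumerate lines 0).filter (fun p => PySem.Str.strip p.2 == "---")).map (·.1)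
  let h1s := ((PySem.List.enumerate lines 0).filter (fun p => PySem.Str.startswith p.2 "# ")).map (·.1)
  let idx : Int :=
    if fences.take 1 == [(0 : Int)] then
      -- fences[1] + 1 if len(fences) > 1 else 0
      match fences with
      | _ :: j :: _ => j + 1
      | _ => 0
    else
      -- h1s[0] + 1 if h1s else 0
      match h1s with
      | i :: _ => i + 1
      | [] => 0
  PySem.Str.join "\n" (lines.take idx.toNat ++ ["", toc] ++ lines.drop idx.toNat)

-- ===== PRECONDITION & SPEC =====
def Spec_insert_toc (content : String) (toc : String) (out : String) : Prop := out = insert_toc_alt content toc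
instance (content : String) (toc : String) (out : String) : Decidable (Spec_insert_toc content toc out) := by unfold Spec_insert_toc; infer_instance

-- ===== CLAIM =====
def Claim_equal_insert_toc : Prop := ∀ (content : String) (toc : String), Dom_insert_toc content toc → Spec_insert_toc content toc (insert_toc content toc)

-- ===== LEMMAS AND PROOFS =====
-- the decision Python A's post-loop if-chain makes from the final state
def pvIdx (p : Int × Int) : Int := if p.1 ≠ -1 then p.1 + 1 else if p.2 ≠ -1 then p.2 + 1 else 0

def pvFind (P : String → Bool) : List String → Int → Int
  | [], _ => 0
  | l :: rest, j => if P l then j + 1 else pvFind P rest (j + 1)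

def pvIdxB (lines : List String) : Int :=
  let fences := ((PySem.List.enumerate lines 0).filter (fun p => PySem.Str.strip p.2 == "---")).map (·.1)
  let h1s := ((PySem.List.enumerate lines 0).filter (fun p => PySem.Str.startswith p.2 "# ")).map (·.1)
  if fences.take 1 == [(0 : Int)] then
    match fences with | _ :: j :: _ => j + 1 | _ => 0
  else
    match h1s with | i :: _ => i + 1 | [] => 0

theorem pvLoopA_fst : ∀ (rest : List String) (i fe h1 : Int), 1 ≤ i →
    (pvLoopA rest i false fe h1).1 = fe
  | [], _, _, _, _ => rfl
  | l :: rest, i, fe, h1, hi => by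
    rw [pvLoopA, if_neg (by simp only [Bool.and_eq_true, beq_iff_eq]; rintro ⟨h, -⟩; omega),
        if_neg (by decide)]
    split
    · rfl
    · exact pvLoopA_fst rest (i + 1) fe h1 (by omega)

theorem pvLoopA_h1 : ∀ (rest : List String) (i : Int), 1 ≤ i →
    pvIdx (pvLoopA rest i false (-1) (-1)) = pvFind (fun l => PySem.Str.startswith l "# ") rest i
  | [], i, _ => by simp [pvLoopA, pvFind, pvIdx]
  | l :: rest, i, hi => by
    rw [pvLoopA, pvFind,
        if_neg (by simp only [Bool.and_eq_true, beq_iff_eq]; rintro ⟨h, -⟩; omega),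
        if_neg (by decide)]
    simp only [show ((-1 : Int) == -1) = true from rfl, Bool.and_true]
    by_cases hh : PySem.Str.startswith l "# " = true
    · rw [if_pos hh, if_pos hh]
      simp only [pvIdx]
      rw [if_neg (by simp), if_pos (by omega : i ≠ -1)]
    · rw [if_neg hh, if_neg hh]
      exact pvLoopA_h1 rest (i + 1) (by omega)

theorem pvLoopA_fm : ∀ (rest : List String) (i : Int), 1 ≤ i →
    pvIdx (pvLoopA rest i true (-1) (-1)) = pvFind (fun l => PySem.Str.strip l == "---") rest i
  | [], i, _ => by simp [pvLoopA, pvFind, pvIdx]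
  | l :: rest, i, hi => by
    rw [pvLoopA, pvFind,
        if_neg (by simp only [Bool.and_eq_true, beq_iff_eq]; rintro ⟨h, -⟩; omega),
        if_pos rfl]
    by_cases hs : (PySem.Str.strip l == "---") = true
    · rw [if_pos hs, if_pos hs]
      simp only [pvIdx, pvLoopA_fst rest (i + 1) i (-1) (by omega)]
      rw [if_pos (by omega : i ≠ -1)]
    · rw [if_neg hs, if_neg hs]
      exact pvLoopA_fm rest (i + 1) (by omega)

theorem pvComp_find (P : String → Bool) : ∀ (ls : List String) (j : Int),
    (match ((PySem.List.enumerate ls j).filter (fun p => P p.2)).map (·.1) with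
     | i :: _ => i + 1
     | [] => 0) = pvFind P ls j
  | [], _ => by simp [PySem.List.enumerate_nil, pvFind]
  | l :: rest, j => by
    rw [PySem.List.enumerate_cons, pvFind]
    by_cases h : P l = true
    · simp [h]
    · simp only [List.filter_cons, h, Bool.false_eq_true, if_false]
      exact pvComp_find P rest (j + 1)

theorem pvComp_ge (P : String → Bool) (ls : List String) (j i : Int)
    (h : i ∈ ((PySem.List.enumerate ls j).filter (fun p => P p.2)).map (·.1)) : j ≤ i := by
  obtain ⟨p, hp, rfl⟩ := List.mem_map.1 h
  have hm := List.mem_filter.1 hp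
  obtain ⟨k, hk, rfl⟩ := (PySem.List.mem_enumerate_iff _ _ _).1 hm.1
  simp only
  omega

theorem pvIdx_eq (lines : List String) :
    pvIdx (pvLoopA lines 0 false (-1) (-1)) = pvIdxB lines := by
  cases lines with
  | nil => simp [pvLoopA, pvIdx, pvIdxB, PySem.List.enumerate_nil]
  | cons l rest =>
    rw [pvLoopA, pvIdxB]
    simp only [show ((0:Int) == 0) = true from rfl, Bool.true_and, PySem.List.enumerate_cons,
      List.filter_cons, zero_add]
    by_cases hs : (PySem.Str.strip l == "---") = true
    · rw [if_pos hs]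
      simp only [hs, if_true, List.map_cons, List.take_succ_cons, List.take_zero,
        show (([(0:Int)] : List Int) == [0]) = true from rfl, if_true]
      rw [pvLoopA_fm rest 1 (le_refl 1),
        ← pvComp_find (fun l => PySem.Str.strip l == "---") rest 1]
      cases ((PySem.List.enumerate rest 1).filter (fun p => PySem.Str.strip p.2 == "---")).map (·.1) with
      | nil => rfl
      | cons j tl => rfl
    · rw [if_neg hs, if_neg (by decide)]
      simp only [hs, Bool.false_eq_true, if_false]
      have hcond : ((((PySem.List.enumerate rest 1).filter (fun p => PySem.Str.strip p.2 == "---")).map (·.1)).take 1 == [(0:Int)]) = false := by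
        cases hfr : ((PySem.List.enumerate rest 1).filter (fun p => PySem.Str.strip p.2 == "---")).map (·.1) with
        | nil => simp
        | cons j tl =>
          have hj : (1 : Int) ≤ j :=
            pvComp_ge (fun l => PySem.Str.strip l == "---") rest 1 j (by rw [hfr]; exact List.mem_cons_self)
          simp only [List.take_succ_cons, List.take_zero, beq_eq_false_iff_ne, ne_eq, List.cons.injEq]
          rintro ⟨rfl, -⟩; omega
      rw [hcond]
      simp only [Bool.false_eq_true, if_false,
        show ((-1 : Int) == -1) = true from rfl, Bool.and_true]
      by_cases hh : PySem.Str.startswith l "# " = true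
      · rw [if_pos hh]
        simp only [pvIdx, hh, if_true, List.map_cons]
        rw [if_neg (by simp), if_pos (by omega : (0 : Int) ≠ -1)]
      · rw [if_neg hh]
        simp only [hh, Bool.false_eq_true, if_false]
        rw [pvLoopA_h1 rest 1 (le_refl 1),
          ← pvComp_find (fun l => PySem.Str.startswith l "# ") rest 1]

-- ===== VERDICT =====
theorem insert_toc_spec : Claim_equal_insert_toc := by
  intro content toc _
  show insert_toc content toc = insert_toc_alt content toc
  have h := pvIdx_eq ((PySem.Str.split? content "\n").getD [])
  simp only [pvIdx, pvIdxB] at h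
  simp only [insert_toc, insert_toc_alt, h]
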